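-- pv_equiv track=rewrite | github.com/1enzo1/nfe-product-import | src/nfe_importer/core/generator.py | _refine_title
-- ===== SOURCE A (Python) =====
-- from typing import Callable, Dict, Iterable, List, Optional, Tuple, cast
--
-- def _refine_title(title: Optional[str]) -> str:
--     """Refine product title for CSV output.
--
--     Rules:
--     - first alphabetical character uppercase, all others lowercase;
--     - if there's a hyphen ('-'), uppercase the next alphabetical character
--       after the hyphen (brand-title style: "Marca - Produto").
--     """
--     if not title:
--         return ""
--     s = str(title).strip().lower()
--     result_chars = []
--     capitalize_next = True
--     for ch in s:
--         if ch.isalpha() and capitalize_next: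
--             result_chars.append(ch.upper())
--             capitalize_next = False
--         else:
--             result_chars.append(ch)
--         if ch == '-':
--             capitalize_next = True
--     return "".join(result_chars)
-- ===== SOURCE B (Python) =====
-- from typing import Optional
--
--
-- def _cap_first_alpha(part: str) -> str:
--     for i, ch in enumerate(part):
--         if ch.isalpha():
--             return part[:i] + ch.upper() + part[i + 1:]
--     return part
--
--
-- def _refine_title(title: Optional[str]) -> str:
--     if not title:
--         return ""
--     s = str(title).strip().lower()
--     return "-".join(_cap_first_alpha(part) for part in s.split("-"))
-- ===== Notes on version B (the rewrite author's own statement) =====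
-- stated objective: simpler
-- what changed: Replaces A's single stateful scan with a capitalize_next flag by splitting on the hyphen, uppercasing the first alphabetical character of each segment, and joining the segments back; the CPython str.split/str.join machinery makes it measurably faster too.
import Mathlib
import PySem

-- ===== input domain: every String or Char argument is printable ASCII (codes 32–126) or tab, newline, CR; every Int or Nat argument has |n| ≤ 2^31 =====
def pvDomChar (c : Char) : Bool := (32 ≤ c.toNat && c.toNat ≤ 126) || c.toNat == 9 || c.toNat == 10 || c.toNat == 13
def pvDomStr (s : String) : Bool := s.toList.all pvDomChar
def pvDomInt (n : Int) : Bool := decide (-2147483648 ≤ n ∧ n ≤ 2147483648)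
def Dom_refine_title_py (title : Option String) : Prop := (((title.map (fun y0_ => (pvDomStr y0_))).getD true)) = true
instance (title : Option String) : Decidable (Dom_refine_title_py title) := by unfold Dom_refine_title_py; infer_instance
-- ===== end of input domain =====

-- B replaces A's single stateful scan with a capitalize_next flag by split('-'),
-- uppercase-first-alpha per segment, and '-'.join — simpler decomposition, same cost.

-- ===== PORT A =====
-- the loop, char by char: state = (result_chars, capitalize_next)
def refineLoopA : List Char → List Char → Bool → List Char
  | [], acc, _ => acc
  | ch :: rest, acc, cap =>
    let acc' := if PySem.Chars.isalpha ch && cap then acc ++ [PySem.Chars.upperChar ch] else acc ++ [ch]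
    let cap' := if PySem.Chars.isalpha ch && cap then false else cap
    refineLoopA rest acc' (if ch = '-' then true else cap')

def refine_title_py (title : Option String) : String :=
  match title with
  | none => ""
  | some t =>
    if t = "" then ""            -- `if not title`
    else
      let s := PySem.Str.lower (PySem.Str.strip t)
      String.mk (refineLoopA s.toList [] true)

-- ===== PORT B =====
-- scan a segment for its first alphabetical character and uppercase it
def upFirstAlpha : List Char → List Char
  | [] => []
  | c :: cs =>
    if PySem.Chars.isalpha c then PySem.Chars.upperChar c :: cs
    else c :: upFirstAlpha cs

def refine_title_py_alt (title : Option String) : String :=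
  match title with
  | none => ""
  | some t =>
    if t = "" then ""
    else
      let s := PySem.Str.lower (PySem.Str.strip t)
      String.mk (List.intercalate ['-'] ((s.toList.splitOn '-').map upFirstAlpha))

-- ===== PRECONDITION & SPEC =====
def Spec_refine_title_py (title : Option String) (out : String) : Prop := out = refine_title_py_alt title
instance (title : Option String) (out : String) : Decidable (Spec_refine_title_py title out) := by unfold Spec_refine_title_py; infer_instance

-- ===== CLAIM (what is proved, stated in full; the proofs are below) =====
def Claim_equal_refine_title_py : Prop := ∀ (title : Option String), Dom_refine_title_py title → Spec_refine_title_py title (refine_title_py title)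

-- ===== LEMMAS AND PROOFS =====

-- pure recursion equal to A's fold
def funA : List Char → Bool → List Char
  | [], _ => []
  | c :: cs, b =>
    (if PySem.Chars.isalpha c && b then PySem.Chars.upperChar c else c) ::
      funA cs (if c = '-' then true else if PySem.Chars.isalpha c && b then false else b)

theorem foldA_eq (cs : List Char) : ∀ (acc : List Char) (b : Bool),
    refineLoopA cs acc b = acc ++ funA cs b := by
  induction cs with
  | nil => intro acc b; simp [refineLoopA, funA]
  | cons c cs ih =>
    intro acc b
    by_cases hd : c = '-'
    · subst hd
      have ha : PySem.Chars.isalpha '-' = false := by decide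
      simp [refineLoopA, funA, ha, ih]
    · by_cases ha : (PySem.Chars.isalpha c && b) = true <;>
        simp [refineLoopA, funA, hd, ha, ih]

-- process the segment list as B does, except that with the flag down the head segment is untouched
def procParts : Bool → List (List Char) → List (List Char)
  | true, ps => ps.map upFirstAlpha
  | false, [] => []
  | false, h :: t => h :: t.map upFirstAlpha

theorem procParts_ne_nil (b : Bool) (ps : List (List Char)) (h : ps ≠ []) :
    procParts b ps ≠ [] := by
  cases b <;> cases ps <;> simp_all [procParts]

theorem intercalate_cons_head (x : Char) (h : List Char) (t : List (List Char)) :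
    List.intercalate ['-'] ((x :: h) :: t) = x :: List.intercalate ['-'] (h :: t) := by
  cases t <;> simp [List.intercalate]

theorem intercalate_nil_head (ps : List (List Char)) (h : ps ≠ []) :
    List.intercalate ['-'] ([] :: ps) = '-' :: List.intercalate ['-'] ps := by
  cases ps with
  | nil => exact absurd rfl h
  | cons p t => simp [List.intercalate]

theorem funA_eq_parts (cs : List Char) : ∀ b : Bool,
    funA cs b = List.intercalate ['-'] (procParts b (cs.splitOn '-')) := by
  induction cs with
  | nil => intro b; cases b <;> simp [funA, List.splitOn, procParts, upFirstAlpha, List.intercalate]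
  | cons c cs ih =>
    intro b
    have hne : cs.splitOn '-' ≠ [] := List.splitOnP_ne_nil _ cs
    by_cases hd : c = '-'
    · subst hd
      have halpha : PySem.Chars.isalpha '-' = false := by decide
      have hsplit : (('-' :: cs).splitOn '-') = [] :: cs.splitOn '-' := by
        simp [List.splitOn, List.splitOnP_cons]
      have hproc : procParts b ([] :: cs.splitOn '-')
          = [] :: procParts true (cs.splitOn '-') := by
        cases b <;> cases h : cs.splitOn '-' <;> simp_all [procParts, upFirstAlpha]
      rw [hsplit, hproc,
        intercalate_nil_head _ (procParts_ne_nil _ _ hne)]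
      simp [funA, halpha, ih true]
    · obtain ⟨h, t, hht⟩ : ∃ h t, cs.splitOn '-' = h :: t := by
        cases hsp : cs.splitOn '-' with
        | nil => exact absurd hsp hne
        | cons h t => exact ⟨h, t, rfl⟩
      have hsplit : ((c :: cs).splitOn '-') = (c :: h) :: t := by
        have hht' : List.splitOnP (fun x => x == '-') cs = h :: t := by
          simpa [List.splitOn] using hht
        simp [List.splitOn, List.splitOnP_cons, hd, hht']
      rw [hsplit]
      by_cases ha : PySem.Chars.isalpha c = true
      · cases b with
        | false =>
          simp only [procParts, intercalate_cons_head]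
          have := ih false; rw [hht] at this
          simp [funA, hd, ha, this, procParts]
        | true =>
          simp only [procParts, List.map_cons, upFirstAlpha, ha, if_pos,
            intercalate_cons_head]
          have := ih false; rw [hht] at this
          simp [funA, hd, ha, this, procParts]
      · have ha' : PySem.Chars.isalpha c = false := by simpa using ha
        cases b with
        | false =>
          simp only [procParts, intercalate_cons_head]
          have := ih false; rw [hht] at this
          simp [funA, hd, ha', this, procParts]
        | true =>
          simp only [procParts, List.map_cons, upFirstAlpha, ha', Bool.false_eq_true,
            if_false]
          rw [intercalate_cons_head]
          have := ih true; rw [hht] at this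
          simp [funA, hd, ha', this, procParts]

theorem refineLoopA_eq (cs : List Char) :
    refineLoopA cs [] true = List.intercalate ['-'] ((cs.splitOn '-').map upFirstAlpha) := by
  rw [foldA_eq cs [] true, funA_eq_parts cs true]
  rfl

-- ===== VERDICT (by name: the statement is the Claim_ definition above) =====
theorem refine_title_py_spec : Claim_equal_refine_title_py := by
  intro title _
  unfold Spec_refine_title_py refine_title_py refine_title_py_alt
  cases title with
  | none => rfl
  | some t =>
    by_cases ht : t = "" <;> simp [ht, refineLoopA_eq]
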